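-- pv_equiv track=rewrite | github.com/gkarwchan/algorithms | standard-algorithms/arrays/maximum_product_subarray.py | split_parts
-- ===== SOURCE A (Python) =====
-- def split_parts(arr):
--     """Return data
--     >>> split_parts([5,8,6,4])
--     [[5, 8, 6, 4]]
--     >>> split_parts([5,8,0,6,4])
--     [[5, 8], [6, 4]]
--     >>> split_parts([1,8,0,6,4,0,8])
--     [[1, 8], [6, 4], [8]]
--     >>> split_parts([1,8,-3,0,0,6,4,0,8])
--     [[1, 8, -3], [6, 4], [8]]
--     >>> split_parts([0,1,8,-3,0,0,6,4,0,8, 0])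
--     [[1, 8, -3], [6, 4], [8]]
--     """
--     parts = [[]]
--     for x in arr:
--       if x == 0:
--         parts.append([])
--       else:
--         parts[-1].append(x)
--     return list(filter(lambda x: x, parts))
-- ===== SOURCE B (Python) =====
-- def split_parts(arr):
--     if 0 not in arr:
--         return [arr] if arr else []
--     i = arr.index(0)
--     return ([arr[:i]] if i > 0 else []) + split_parts(arr[i + 1:])
-- ===== Notes on version B (the rewrite author's own statement) =====
-- stated objective: alternative
-- what changed: B is recursive divide-and-conquer on the first zero: it locates the first 0 with index, slices off the prefix run (emitted if nonempty) and recurses on the suffix, instead of A's single iterative pass that appends into sentinel empty sublists and filters them out afterwards.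
import Mathlib
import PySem

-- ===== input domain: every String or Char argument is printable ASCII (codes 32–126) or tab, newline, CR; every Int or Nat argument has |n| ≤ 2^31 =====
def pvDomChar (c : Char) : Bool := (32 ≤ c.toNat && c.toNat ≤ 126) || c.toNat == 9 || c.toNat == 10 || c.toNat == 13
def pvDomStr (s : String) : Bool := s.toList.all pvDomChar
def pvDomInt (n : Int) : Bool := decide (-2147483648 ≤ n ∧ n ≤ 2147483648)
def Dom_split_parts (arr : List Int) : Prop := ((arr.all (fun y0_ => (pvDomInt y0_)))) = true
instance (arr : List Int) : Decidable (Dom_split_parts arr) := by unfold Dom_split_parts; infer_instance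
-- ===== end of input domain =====

-- B is recursive: split at the first zero (index + slices) and recurse on the suffix,
-- instead of A's single iterative pass with sentinel empty sublists filtered afterwards
-- (objective: alternative decomposition, same cost).

-- ===== PORT A =====
-- parts[-1].append(x): replace the last list of a nonempty list of lists
def pvAppendLast : List (List Int) → Int → List (List Int)
  | [], _ => []
  | [l], x => [l ++ [x]]
  | l :: ls, x => l :: pvAppendLast ls x

def pvStepA (parts : List (List Int)) (x : Int) : List (List Int) :=
  if x == 0 then parts ++ [[]] else pvAppendLast parts x

def split_parts (arr : List Int) : List (List Int) :=
  (arr.foldl pvStepA [[]]).filter (fun p => !p.isEmpty)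

-- ===== PORT B =====
def split_parts_alt (arr : List Int) : List (List Int) :=
  match h : PySem.List.index? arr 0 with
  | none => if arr.isEmpty then [] else [arr]      -- 0 not in arr
  | some i =>
      -- i = arr.index(0); ([arr[:i]] if i > 0 else []) + split_parts(arr[i+1:])
      (if 0 < i then [PySem.List.slice arr none (some (i : Int))] else []) ++
        split_parts_alt (PySem.List.slice arr (some ((i : Int) + 1)) none)
termination_by arr.length
decreasing_by
  obtain ⟨hk, -, -⟩ := PySem.List.getElem_of_index?_eq_some h
  have : ((i : Int) + 1) = (((i + 1 : Nat) : Int)) := by push_cast; ring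
  rw [this, PySem.List.slice_from_natCast]
  simp only [List.length_drop]
  omega

-- ===== PRECONDITION & SPEC =====
def Spec_split_parts (arr : List Int) (out : List (List Int)) : Prop := out = split_parts_alt arr
instance (arr : List Int) (out : List (List Int)) : Decidable (Spec_split_parts arr out) := by unfold Spec_split_parts; infer_instance

-- ===== CLAIM (what is proved, stated in full; the proofs are below) =====
def Claim_equal_split_parts : Prop := ∀ (arr : List Int), Dom_split_parts arr → Spec_split_parts arr (split_parts arr)

-- ===== LEMMAS AND PROOFS =====

theorem pvAppendLast_ne_nil (rest : List (List Int)) (x : Int) (h : rest ≠ []) :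
    pvAppendLast rest x ≠ [] := by
  cases rest with
  | nil => exact absurd rfl h
  | cons l ls => cases ls <;> simp [pvAppendLast]

theorem pvAppendLast_pre (done rest : List (List Int)) (x : Int) (h : rest ≠ []) :
    pvAppendLast (done ++ rest) x = done ++ pvAppendLast rest x := by
  induction done with
  | nil => rfl
  | cons d ds ih =>
    obtain ⟨c, cs, hc⟩ : ∃ c cs, ds ++ rest = c :: cs := by
      cases hds : ds ++ rest with
      | nil => exact absurd (List.append_eq_nil_iff.mp hds).2 h
      | cons c cs => exact ⟨c, cs, rfl⟩
    simp only [List.cons_append, hc, pvAppendLast]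
    rw [← hc, ih]

theorem foldlA_pre (arr : List Int) : ∀ (done rest : List (List Int)), rest ≠ [] →
    List.foldl pvStepA (done ++ rest) arr = done ++ List.foldl pvStepA rest arr := by
  induction arr with
  | nil => intro done rest h; rfl
  | cons x xs ih =>
    intro done rest h
    simp only [List.foldl_cons, pvStepA]
    by_cases hx : x == 0
    · simp only [hx, if_true]
      rw [List.append_assoc, ih done (rest ++ [[]]) (by simp)]
    · simp only [hx, if_neg, Bool.false_eq_true, not_false_iff]
      rw [pvAppendLast_pre done rest x h, ih done _ (pvAppendLast_ne_nil rest x h)]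

-- a zero-free segment is accumulated into the current (last) run
theorem foldlA_zerofree (pre : List Int) : ∀ (run : List Int), 0 ∉ pre →
    List.foldl pvStepA [run] pre = [run ++ pre] := by
  induction pre with
  | nil => intro run _; simp
  | cons x xs ih =>
    intro run hz
    have hxne : x ≠ 0 := by
      intro hc; exact hz (by simp [hc])
    have hx : (x == 0) = false := by simp [hxne]
    simp only [List.foldl_cons, pvStepA, hx, Bool.false_eq_true, if_false, pvAppendLast]
    rw [ih (run ++ [x]) (by simp_all)]
    simp

theorem pv_main : ∀ (n : Nat) (arr : List Int), arr.length ≤ n →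
    split_parts arr = split_parts_alt arr := by
  intro n
  induction n with
  | zero =>
    intro arr hlen
    have : arr = [] := List.eq_nil_of_length_eq_zero (Nat.le_zero.mp hlen)
    subst this
    have hnone : PySem.List.index? ([] : List Int) 0 = none :=
      (PySem.List.index?_eq_none_iff _ _).mpr (by simp)
    rw [split_parts_alt, hnone]
    simp [split_parts]
  | succ m ih =>
    intro arr hlen
    match h : PySem.List.index? arr 0 with
    | none =>
      have hz : 0 ∉ arr := (PySem.List.index?_eq_none_iff arr 0).mp h
      rw [split_parts_alt, h]
      unfold split_parts
      rw [foldlA_zerofree arr [] hz]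
      cases arr <;> simp [List.filter]
    | some i =>
      obtain ⟨pre, suf, harr, hilen, hzpre⟩ := (PySem.List.index?_eq_some_iff arr 0 i).mp h
      -- evaluate the slices
      have hslice1 : PySem.List.slice arr none (some (i : Int)) = pre := by
        rw [PySem.List.slice_to_natCast, harr, ← hilen]
        simp
      have hslice2 : PySem.List.slice arr (some ((i : Int) + 1)) none = suf := by
        have : ((i : Int) + 1) = (((i + 1 : Nat) : Int)) := by push_cast; ring
        rw [this, PySem.List.slice_from_natCast, harr, ← hilen]
        simp
      rw [split_parts_alt, h]
      simp only [hslice1, hslice2]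
      -- evaluate A on pre ++ 0 :: suf
      unfold split_parts
      rw [harr]
      have hA : List.foldl pvStepA [[]] (pre ++ 0 :: suf)
          = pre :: List.foldl pvStepA [[]] suf := by
        rw [List.foldl_append, foldlA_zerofree pre [] hzpre]
        simp only [List.nil_append, List.foldl_cons, pvStepA, if_pos (by decide : ((0:Int) == 0) = true)]
        rw [foldlA_pre suf [pre] [[]] (by simp)]
        rfl
      rw [hA, List.filter_cons]
      have hrec : (List.foldl pvStepA [[]] suf).filter (fun p => !p.isEmpty)
          = split_parts_alt suf := by
        have hsl : suf.length ≤ m := by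
          have := hlen
          rw [harr] at this
          simp only [List.length_append, List.length_cons] at this
          omega
        have := ih suf hsl
        unfold split_parts at this
        exact this
      by_cases hpre : pre = []
      · subst hpre
        have h0 : i = 0 := by simp at hilen; omega
        subst h0
        simp only [List.isEmpty_nil, Bool.not_true, Bool.false_eq_true, if_false,
          Nat.lt_irrefl, List.nil_append]
        exact hrec
      · have h0i : 0 < i := by
          rw [← hilen]
          cases pre with
          | nil => exact absurd rfl hpre
          | cons a as => simp
        have hne : (!pre.isEmpty) = true := by simp [hpre]
        rw [if_pos hne, if_pos h0i, hrec]
        simp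

-- ===== VERDICT (by name: the statement is the Claim_ definition above) =====
theorem split_parts_spec : Claim_equal_split_parts := by
  intro arr _
  show split_parts arr = split_parts_alt arr
  exact pv_main arr.length arr le_rfl
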